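-- pv_equiv track=rewrite | github.com/BenRStutzman/kryptos | ragbaby.py | make_alpha
-- ===== SOURCE A (Python) =====
-- def make_alpha(word):
--     alpha = 'abcdefghijklmnopqrstuvwxyz'
--     new_alpha = ''
--     for letter in word:
--         if letter not in new_alpha:
--             new_alpha += letter
--     for letter in alpha:
--         if letter not in new_alpha:
--             new_alpha += letter
--     return new_alpha
-- ===== SOURCE B (Python) =====
-- def make_alpha(word):
--     alpha = 'abcdefghijklmnopqrstuvwxyz'
--
--     def first_occurrences(s):
--         if not s:
--             return ''
--         c = s[0]
--         return c + first_occurrences(s[1:].replace(c, ''))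
--
--     return first_occurrences(word) + ''.join(c for c in alpha if c not in word)
-- ===== Notes on version B (the rewrite author's own statement) =====
-- stated objective: alternative
-- what changed: Instead of one growing accumulator fed by two sequential loops with membership tests against it, B splits the result into two independent parts: a removal-based recursion (take the first character, delete all its copies from the rest) that dedups the word, plus a filter keeping alphabet letters absent from the word.
import Mathlib
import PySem

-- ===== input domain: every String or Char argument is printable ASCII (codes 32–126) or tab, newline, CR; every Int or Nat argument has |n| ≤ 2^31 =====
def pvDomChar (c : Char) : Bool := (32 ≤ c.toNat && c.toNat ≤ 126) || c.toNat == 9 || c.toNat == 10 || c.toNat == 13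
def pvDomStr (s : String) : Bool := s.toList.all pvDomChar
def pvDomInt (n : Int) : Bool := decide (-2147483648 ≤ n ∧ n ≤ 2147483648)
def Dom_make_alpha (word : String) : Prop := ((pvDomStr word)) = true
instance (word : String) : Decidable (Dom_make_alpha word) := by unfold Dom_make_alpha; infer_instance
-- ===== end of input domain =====

-- B replaces A's single growing accumulator (two loops testing membership in it) by two independent
-- parts: a removal-based recursive dedup of the word, plus a filter of the alphabet against the word;
-- objective: alternative (same cost class, genuinely different algorithm).

-- ===== PORT A =====
-- A's loop body: append `c` unless already present (Python's `letter not in new_alpha` on a 1-char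
-- letter is character membership; ported as List.contains).
def aStep (acc : List Char) (c : Char) : List Char :=
  if acc.contains c then acc else acc ++ [c]

def make_alpha (word : String) : String :=
  let na := word.toList.foldl aStep []
  let na2 := ("abcdefghijklmnopqrstuvwxyz".toList).foldl aStep na
  String.mk na2

-- ===== PORT B =====
-- Python's s[1:].replace(c, '') removes every occurrence of the one character c: exactly filter (· ≠ c).
def firstOccurrences (l : List Char) : List Char :=
  match l with
  | [] => []
  | c :: r => c :: firstOccurrences (r.filter (fun x => x ≠ c))
termination_by l.length
decreasing_by simpa using le_trans (List.length_filter_le _ _) (by simp)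

def make_alpha_alt (word : String) : String :=
  String.mk (firstOccurrences word.toList ++
    ("abcdefghijklmnopqrstuvwxyz".toList).filter (fun c => !word.toList.contains c))

-- ===== PRECONDITION & SPEC =====
def Spec_make_alpha (word : String) (out : String) : Prop := out = make_alpha_alt word
instance (word : String) (out : String) : Decidable (Spec_make_alpha word out) := by unfold Spec_make_alpha; infer_instance

-- ===== CLAIM (what is proved, stated in full; the proofs are below) =====
def Claim_equal_make_alpha : Prop := ∀ (word : String), Dom_make_alpha word → Spec_make_alpha word (make_alpha word)

-- ===== LEMMAS AND PROOFS =====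

theorem firstOcc_nil : firstOccurrences [] = [] := by rw [firstOccurrences]

theorem firstOcc_cons (c : Char) (r : List Char) :
    firstOccurrences (c :: r) = c :: firstOccurrences (r.filter (fun x => x ≠ c)) := by
  rw [firstOccurrences]

theorem mem_foldl_aStep (l : List Char) (acc : List Char) (x : Char) :
    x ∈ l.foldl aStep acc ↔ x ∈ acc ∨ x ∈ l := by
  induction l generalizing acc with
  | nil => simp
  | cons c r ih =>
    simp only [List.foldl_cons, aStep]
    split_ifs with h
    · have hc : c ∈ acc := by simpa using h
      rw [ih]
      constructor
      · rintro hx; exact hx.imp id (List.mem_cons_of_mem c)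
      · rintro (hx | hx)
        · exact Or.inl hx
        · rcases List.mem_cons.mp hx with rfl | hx
          · exact Or.inl hc
          · exact Or.inr hx
    · rw [ih]
      simp [List.mem_append, or_assoc]

-- A's whole first loop is B's removal-based dedup (generalised over the accumulator).
theorem foldl_aStep_eq_firstOcc (n : Nat) :
    ∀ (l : List Char), l.length ≤ n → ∀ (acc : List Char),
      l.foldl aStep acc = acc ++ firstOccurrences (l.filter (fun x => !acc.contains x)) := by
  induction n with
  | zero =>
    intro l hl acc
    have : l = [] := List.eq_nil_of_length_eq_zero (Nat.le_zero.mp hl)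
    subst this; simp [firstOcc_nil]
  | succ n ih =>
    intro l hl acc
    cases l with
    | nil => simp [firstOcc_nil]
    | cons c r =>
      simp only [List.foldl_cons]
      by_cases hc : c ∈ acc
      · have hstep : aStep acc c = acc := by simp [aStep, hc]
        rw [hstep, ih r (Nat.le_of_succ_le_succ hl) acc]
        have : (c :: r).filter (fun x => !acc.contains x)
            = r.filter (fun x => !acc.contains x) := by
          simp [hc]
        rw [this]
      · have hstep : aStep acc c = acc ++ [c] := by simp [aStep, hc]
        rw [hstep, ih r (Nat.le_of_succ_le_succ hl) (acc ++ [c])]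
        have hfilt : r.filter (fun x => !(acc ++ [c]).contains x)
            = (r.filter (fun x => !acc.contains x)).filter (fun x => x ≠ c) := by
          rw [List.filter_filter]
          apply List.filter_congr
          intro x _
          by_cases hx : x = c <;> simp [hx, List.mem_append]
        rw [hfilt]
        have hhead : (c :: r).filter (fun x => !acc.contains x)
            = c :: r.filter (fun x => !acc.contains x) := by
          simp [hc]
        rw [hhead, firstOcc_cons]
        simp

-- A's second loop over a duplicate-free list just appends the letters not yet present.
theorem foldl_aStep_nodup (l : List Char) (hl : l.Nodup) (acc : List Char) :
    l.foldl aStep acc = acc ++ l.filter (fun c => !acc.contains c) := by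
  induction l generalizing acc with
  | nil => simp
  | cons c r ih =>
    have hcr : c ∉ r := (List.nodup_cons.mp hl).1
    have hr : r.Nodup := (List.nodup_cons.mp hl).2
    simp only [List.foldl_cons]
    by_cases hc : c ∈ acc
    · have hstep : aStep acc c = acc := by simp [aStep, hc]
      rw [hstep, ih hr acc]
      simp [hc]
    · have hstep : aStep acc c = acc ++ [c] := by simp [aStep, hc]
      rw [hstep, ih hr (acc ++ [c])]
      have : r.filter (fun x => !(acc ++ [c]).contains x)
          = r.filter (fun x => !acc.contains x) := by
        apply List.filter_congr
        intro x hx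
        have hxc : x ≠ c := fun h => hcr (h ▸ hx)
        simp [List.mem_append, hxc]
      rw [this]
      simp [hc]

theorem alpha_nodup : ("abcdefghijklmnopqrstuvwxyz".toList).Nodup := by decide

-- ===== VERDICT (by name: the statement is the Claim_ definition above) =====
theorem make_alpha_spec : Claim_equal_make_alpha := by
  intro word _
  unfold Spec_make_alpha make_alpha make_alpha_alt
  show String.mk (("abcdefghijklmnopqrstuvwxyz".toList).foldl aStep
      (word.toList.foldl aStep [])) = _
  have h1 : word.toList.foldl aStep [] = firstOccurrences word.toList := by
    rw [foldl_aStep_eq_firstOcc word.toList.length word.toList (le_refl _) []]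
    simp
  rw [foldl_aStep_nodup _ alpha_nodup, h1]
  congr 1
  congr 1
  apply List.filter_congr
  intro c _
  have hmem : c ∈ firstOccurrences word.toList ↔ c ∈ word.toList := by
    constructor
    · intro h
      have := (mem_foldl_aStep word.toList [] c).mp (h1 ▸ h)
      simpa using this
    · intro h
      have := (mem_foldl_aStep word.toList [] c).mpr (Or.inr h)
      rwa [h1] at this
  by_cases hc : c ∈ word.toList <;> simp [hc, hmem]
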